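-- pv_equiv track=rewrite | github.com/AlexeiVartoumian/algorithmicProblems | codeSignal/Array/areSimilar.py | solution
-- ===== SOURCE A (Python) =====
-- def solution(a, b):
--
--
--     if len(a)!= len(b):
--         return False
--
--     tempa = []
--     tempb = []
--
--     count = 0
--     for i in range(len(a)):
--
--         if a[i] != b[i]:
--
--             count +=1
--             tempa.append(a[i])
--             tempb.append(b[i])
--         if count >2:
--             return False
--
--
--     return len(tempa) <=2 and  tempa == tempb[::-1]
-- ===== SOURCE B (Python) =====
-- def solution(a, b):
--     if len(a) != len(b):
--         return False
--     if sorted(a) != sorted(b):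
--         return False
--     return sum(x != y for x, y in zip(a, b)) <= 2
-- ===== Notes on version B (the rewrite author's own statement) =====
-- stated objective: alternative
-- what changed: B decides by a multiset criterion instead of examining the mismatched values: two arrays are equal up to one swap iff they have equal length, equal sorted contents, and at most two positions disagree; this replaces A's accumulation of two mismatch-value lists with an early-exit counter and reversed-list comparison.
import Mathlib
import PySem

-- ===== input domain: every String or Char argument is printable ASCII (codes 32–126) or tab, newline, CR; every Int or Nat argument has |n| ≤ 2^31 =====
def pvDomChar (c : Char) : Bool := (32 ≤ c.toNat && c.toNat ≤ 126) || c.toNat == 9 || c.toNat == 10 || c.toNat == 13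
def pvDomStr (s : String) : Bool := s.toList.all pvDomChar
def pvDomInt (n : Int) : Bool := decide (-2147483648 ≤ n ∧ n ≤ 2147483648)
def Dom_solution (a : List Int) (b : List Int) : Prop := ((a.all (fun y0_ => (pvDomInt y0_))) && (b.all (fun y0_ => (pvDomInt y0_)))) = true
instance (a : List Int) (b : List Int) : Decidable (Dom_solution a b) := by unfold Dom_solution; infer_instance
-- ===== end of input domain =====

-- B decides by a multiset criterion (equal sorted contents and at most two mismatched
-- positions) instead of A's accumulation of mismatch-value lists compared against a
-- reversal (objective: alternative algorithm, not faster).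

-- ===== PORT A =====
-- a[i]/b[i] read with pyGetD default 0: the loop runs i < len(a) = len(b), so the default is never used.
def solutionLoopA (a b : List Int) (n i : Nat) (tempa tempb : List Int) (count : Int) : Bool :=
  if h : i < n then
    let ai := PySem.List.pyGetD a (i : Int) 0
    let bi := PySem.List.pyGetD b (i : Int) 0
    if ai ≠ bi then
      if count + 1 > 2 then false
      else solutionLoopA a b n (i + 1) (tempa ++ [ai]) (tempb ++ [bi]) (count + 1)
    else
      if count > 2 then false
      else solutionLoopA a b n (i + 1) tempa tempb count
  else
    -- tempa == tempb[::-1]; slice? with step -1 never returns none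
    decide (tempa.length ≤ 2) && (tempa == (PySem.List.slice? tempb none none (-1)).getD [])
termination_by n - i
decreasing_by all_goals omega

def solution (a : List Int) (b : List Int) : Bool :=
  if a.length ≠ b.length then false
  else solutionLoopA a b a.length 0 [] [] 0

-- ===== PORT B =====
def solution_alt (a : List Int) (b : List Int) : Bool :=
  if a.length ≠ b.length then false
  else if PySem.List.sorted a (fun x => x) false ≠ PySem.List.sorted b (fun x => x) false then false
  else
    decide (((a.zip b).foldl (fun s p => s + if p.1 ≠ p.2 then (1 : Int) else 0) 0) ≤ 2)

-- ===== PRECONDITION & SPEC =====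
def Spec_solution (a : List Int) (b : List Int) (out : Bool) : Prop := out = solution_alt a b
instance (a : List Int) (b : List Int) (out : Bool) : Decidable (Spec_solution a b out) := by unfold Spec_solution; infer_instance

-- ===== CLAIM (what is proved, stated in full; the proofs are below) =====
def Claim_equal_solution : Prop := ∀ (a : List Int) (b : List Int), Dom_solution a b → Spec_solution a b (solution a b)

-- ===== LEMMAS AND PROOFS =====

/-- The mismatched pairs of positions of `a` and `b`. -/
def pvD (a b : List Int) : List (Int × Int) := (a.zip b).filter (fun p => p.1 != p.2)

lemma loopA_char (a b : List Int) (n : Nat) (hn : n = a.length) (hb : a.length = b.length) :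
    ∀ (da db ta tb : List Int) (i : Nat), da = a.drop i → db = b.drop i →
    solutionLoopA a b n i ta tb (ta.length : Int) =
      (if 2 < ta.length + (pvD da db).length then false
       else ((ta ++ (pvD da db).map Prod.fst) == ((tb ++ (pvD da db).map Prod.snd).reverse))) := by
  intro da
  induction da with
  | nil =>
      intro db ta tb i hda hdb
      have hi : a.length ≤ i := by
        have := congrArg List.length hda; simp at this; omega
      have hdbnil : db = [] := by
        have := congrArg List.length hdb; simp at this
        cases db with
        | nil => rfl
        | cons z zs => simp at this; omega
      subst hdbnil
      rw [solutionLoopA, dif_neg (by omega)]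
      simp only [pvD, List.zip_nil_left, List.filter_nil, List.map_nil, List.append_nil,
        List.length_nil, Nat.add_zero, PySem.List.slice?_none_none_neg_one, Option.getD_some]
      by_cases hl : ta.length ≤ 2
      · rw [if_neg (by omega)]; simp [hl]
      · rw [if_pos (by omega)]; simp [hl]
  | cons x da' ih =>
      intro db ta tb i hda hdb
      have hi : i < n := by
        have := congrArg List.length hda; simp at this; omega
      obtain ⟨y, db', hdbc⟩ : ∃ y db', db = y :: db' := by
        have := congrArg List.length hdb; simp at this
        cases db with
        | nil => simp at this; omega
        | cons z zs => exact ⟨z, zs, rfl⟩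
      subst hdbc
      have hax : a[i]?.getD 0 = x := by
        have h0 : (a.drop i)[0]? = a[i + 0]? := List.getElem?_drop
        rw [← hda] at h0; simp only [List.getElem?_cons_zero, Nat.add_zero] at h0
        rw [← h0]; rfl
      have hby : b[i]?.getD 0 = y := by
        have h0 : (b.drop i)[0]? = b[i + 0]? := List.getElem?_drop
        rw [← hdb] at h0; simp only [List.getElem?_cons_zero, Nat.add_zero] at h0
        rw [← h0]; rfl
      have hda' : da' = a.drop (i + 1) := by
        have : a.drop (i + 1) = (a.drop i).drop 1 := by rw [List.drop_drop]
        rw [this, ← hda]; rfl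
      have hdb' : db' = b.drop (i + 1) := by
        have : b.drop (i + 1) = (b.drop i).drop 1 := by rw [List.drop_drop]
        rw [this, ← hdb]; rfl
      rw [solutionLoopA, dif_pos hi]
      simp only [PySem.List.pyGetD_natCast, List.getD_eq_getElem?_getD, hax, hby]
      by_cases hxy : x = y
      · rw [if_neg (not_not_intro hxy)]
        have hm : pvD (x :: da') (y :: db') = pvD da' db' := by
          simp [pvD, hxy]
        rw [hm]
        by_cases hlen : (2 : Int) < (ta.length : Int)
        · rw [if_pos hlen, if_pos (by omega)]
        · rw [if_neg hlen, ih db' ta tb (i + 1) hda' hdb']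
      · rw [if_pos hxy]
        have hm : pvD (x :: da') (y :: db') = (x, y) :: pvD da' db' := by
          simp [pvD, bne_iff_ne, hxy]
        rw [hm]
        by_cases hlen : (2 : Int) < (ta.length : Int) + 1
        · rw [if_pos hlen, if_pos (by simp only [List.length_cons]; omega)]
        · rw [if_neg hlen]
          have hcast : (ta.length : Int) + 1 = ((ta ++ [x]).length : Int) := by simp
          rw [hcast, ih db' (ta ++ [x]) (tb ++ [y]) (i + 1) hda' hdb']
          exact if_congr (by simp only [List.length_append, List.length_cons, List.length_nil]; omega)
            rfl (by simp [List.append_assoc])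

lemma solution_char (a b : List Int) (h : a.length = b.length) :
    solution a b =
      (if 2 < (pvD a b).length then false
       else ((pvD a b).map Prod.fst == ((pvD a b).map Prod.snd).reverse)) := by
  unfold solution
  rw [if_neg (by omega)]
  have h0 : (0 : Int) = ((([] : List Int)).length : Int) := by simp
  rw [h0, loopA_char a b a.length rfl h a b [] [] 0 (by simp) (by simp)]
  simp

lemma count_foldl (l : List (Int × Int)) : ∀ s : Int,
    l.foldl (fun s p => s + if p.1 ≠ p.2 then (1 : Int) else 0) s
      = s + ((l.filter (fun p => p.1 != p.2)).length : Int) := by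
  induction l with
  | nil => intro s; simp
  | cons p t ih =>
      intro s
      by_cases hp : p.1 = p.2
      · simp only [List.foldl_cons, List.filter_cons, hp]
        rw [ih]; simp
      · simp only [List.foldl_cons, List.filter_cons]
        rw [if_pos hp, ih]
        simp [bne_iff_ne, hp]
        omega

lemma alt_char (a b : List Int) (h : a.length = b.length) :
    solution_alt a b =
      (if PySem.List.sorted a (fun x => x) false ≠ PySem.List.sorted b (fun x => x) false
       then false
       else decide ((pvD a b).length ≤ 2)) := by
  unfold solution_alt
  rw [if_neg (by omega)]
  by_cases hs : PySem.List.sorted a (fun x => x) false = PySem.List.sorted b (fun x => x) false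
  · rw [if_neg (not_not_intro hs), if_neg (not_not_intro hs), count_foldl]
    exact decide_eq_decide.mpr (by simp only [pvD]; omega)
  · rw [if_pos hs, if_pos hs]

/-- Count bookkeeping: `a` plus the mismatched `b`-values is a rearrangement of
    `b` plus the mismatched `a`-values. -/
lemma cross (a : List Int) : ∀ (b : List Int), a.length = b.length → ∀ v : Int,
    a.count v + ((pvD a b).map Prod.snd).count v
      = b.count v + ((pvD a b).map Prod.fst).count v := by
  induction a with
  | nil =>
      intro b hb v
      cases b with
      | nil => simp [pvD]
      | cons y t => simp at hb
  | cons x a' ih =>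
      intro b hb v
      cases b with
      | nil => simp at hb
      | cons y b' =>
          have hb' : a'.length = b'.length := by simp at hb; omega
          have := ih b' hb' v
          by_cases hxy : x = y
          · have hm : pvD (x :: a') (y :: b') = pvD a' b' := by simp [pvD, hxy]
            rw [hm]
            subst hxy
            simp only [List.count_cons]
            omega
          · have hm : pvD (x :: a') (y :: b') = (x, y) :: pvD a' b' := by
              simp [pvD, bne_iff_ne, hxy]
            rw [hm]
            simp only [List.map_cons, List.count_cons]
            omega

lemma perm_iff_d (a b : List Int) (h : a.length = b.length) :
    a.Perm b ↔ ((pvD a b).map Prod.snd).Perm ((pvD a b).map Prod.fst) := by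
  rw [List.perm_iff_count, List.perm_iff_count]
  constructor
  · intro hp v; have := cross a b h v; have := hp v; omega
  · intro hp v; have := cross a b h v; have := hp v; omega

lemma sorted_iff_d (a b : List Int) (h : a.length = b.length) :
    PySem.List.sorted a (fun x => x) false = PySem.List.sorted b (fun x => x) false ↔
      ((pvD a b).map Prod.snd).Perm ((pvD a b).map Prod.fst) := by
  rw [PySem.List.sorted_id_eq_sorted_id_iff_perm, perm_iff_d a b h]

lemma pair_perm (x y u v : Int) :
    ([y, v] : List Int).Perm [x, u] ↔ (y = x ∧ v = u) ∨ (y = u ∧ v = x) := by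
  constructor
  · intro hp
    have hy : y ∈ ([x, u] : List Int) := hp.mem_iff.mp (by simp)
    simp at hy
    rcases hy with hy | hy
    · subst hy
      have h2 : ([v] : List Int).Perm [u] := (List.perm_cons y).mp hp
      left; exact ⟨rfl, List.singleton_perm_singleton.mp h2⟩
    · subst hy
      have hswap : ([x, y] : List Int).Perm [y, x] := List.Perm.swap y x []
      have h2 : ([v] : List Int).Perm [x] := (List.perm_cons y).mp (hp.trans hswap)
      right; exact ⟨rfl, List.singleton_perm_singleton.mp h2⟩
  · rintro (⟨h1, h2⟩ | ⟨h1, h2⟩)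
    · rw [h1, h2]
    · rw [h1, h2]; exact List.Perm.swap x u []

lemma d_ne {a b : List Int} {p : Int × Int} (hp : p ∈ pvD a b) : p.1 ≠ p.2 := by
  have := List.of_mem_filter hp
  simpa using this

-- ===== VERDICT (by name: the statement is the Claim_ definition above) =====
theorem solution_spec : Claim_equal_solution := by
  intro a b _
  unfold Spec_solution
  by_cases h : a.length = b.length
  · rw [solution_char a b h, alt_char a b h]
    by_cases hp : ((pvD a b).map Prod.snd).Perm ((pvD a b).map Prod.fst)
    · have hs := (sorted_iff_d a b h).mpr hp
      rw [if_neg (not_not_intro hs)]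
      rcases hm : pvD a b with _ | ⟨⟨x, y⟩, _ | ⟨⟨u, v⟩, _ | ⟨p, rest⟩⟩⟩
      · rw [if_neg (by simp)]; simp
      · -- one mismatch cannot preserve the multiset
        have hne : x ≠ y := d_ne (p := (x, y)) (by rw [hm]; simp)
        rw [hm] at hp
        simp only [List.map_cons, List.map_nil] at hp
        exact absurd (List.singleton_perm_singleton.mp hp).symm hne
      · -- two mismatches forming a swap
        have hne1 : x ≠ y := d_ne (p := (x, y)) (by rw [hm]; simp)
        rw [hm] at hp
        simp only [List.map_cons, List.map_nil] at hp
        rcases (pair_perm x y u v).mp hp with ⟨h1, h2⟩ | ⟨h1, h2⟩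
        · exact absurd h1.symm hne1
        · rw [if_neg (by simp)]
          subst h1; subst h2
          simp
      · -- three or more: both false
        rw [if_pos (by simp)]
        simp
    · have hs : PySem.List.sorted a (fun x => x) false ≠ PySem.List.sorted b (fun x => x) false :=
        fun he => hp ((sorted_iff_d a b h).mp he)
      rw [if_pos hs]
      rcases hm : pvD a b with _ | ⟨⟨x, y⟩, _ | ⟨⟨u, v⟩, _ | ⟨p, rest⟩⟩⟩
      · exact absurd (by rw [hm]; simp) hp
      · rw [if_neg (by simp)]
        have hne : x ≠ y := d_ne (p := (x, y)) (by rw [hm]; simp)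
        simp [hne]
      · rw [if_neg (by simp)]
        rw [hm] at hp
        simp only [List.map_cons, List.map_nil] at hp
        have hno : ¬ (x = v ∧ u = y) := by
          rintro ⟨h1, h2⟩
          exact hp ((pair_perm x y u v).mpr (Or.inr ⟨h2.symm, h1.symm⟩))
        simp only [List.map_cons, List.map_nil, List.reverse_cons, List.reverse_nil,
          List.nil_append, List.cons_append]
        refine beq_eq_false_iff_ne.mpr ?_
        intro hcontra
        injection hcontra with h1 ht
        injection ht with h2 _
        exact hno ⟨h1, h2⟩
      · rw [if_pos (by simp)]
  · unfold solution solution_alt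
    rw [if_pos (by omega), if_pos (by omega)]
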